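-- pv_equiv track=rewrite | github.com/erikbayerlein/Programming-S1 | matriz/valor_lc_mat.py | maior_linha
-- ===== SOURCE A (Python) =====
-- def maior_linha (mat, linha, coluna):
--     maior = 0
--     som = 0
--     m_linha = 0
--     for i in range (linha):
--         for j in range (coluna):
--             som += mat [i][j]**2
--         if maior <= som:
--             m_linha = i
--             maior = som
--         som = 0
--     return maior, m_linha
-- ===== SOURCE B (Python) =====
-- def maior_linha(mat, linha, coluna):
--     # Build the table of per-row sums of squares, then pick max and last argmax.
--     sums = [sum(mat[i][j] ** 2 for j in range(coluna)) for i in range(linha)]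
--     if not sums:
--         return 0, 0
--     maior = max(sums)
--     return maior, len(sums) - 1 - sums[::-1].index(maior)
-- ===== Notes on version B (the rewrite author's own statement) =====
-- stated objective: alternative
-- what changed: Replaces the interleaved single-pass max-tracking with initial-zero sentinel by a build-table-then-scan decomposition: build the list of per-row sums of squares, take max(sums), and recover the last maximal row index from a reversed .index scan.
import Mathlib
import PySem

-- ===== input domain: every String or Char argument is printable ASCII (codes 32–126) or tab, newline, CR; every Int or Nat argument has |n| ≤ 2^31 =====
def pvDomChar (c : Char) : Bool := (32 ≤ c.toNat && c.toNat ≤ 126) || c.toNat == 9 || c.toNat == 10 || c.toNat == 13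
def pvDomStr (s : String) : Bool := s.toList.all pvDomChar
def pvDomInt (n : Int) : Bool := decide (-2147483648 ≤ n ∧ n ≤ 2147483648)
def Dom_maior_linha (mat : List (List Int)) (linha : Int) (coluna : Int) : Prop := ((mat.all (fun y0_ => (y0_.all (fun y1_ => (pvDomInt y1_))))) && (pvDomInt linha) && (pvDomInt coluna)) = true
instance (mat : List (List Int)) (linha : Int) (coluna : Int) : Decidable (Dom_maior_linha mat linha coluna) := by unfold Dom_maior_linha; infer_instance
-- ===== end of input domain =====

-- B replaces A's interleaved single-pass max tracking by a build-table-then-scan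
-- decomposition (per-row sums of squares, then max and last argmax); objective: alternative.

-- ===== PORT A =====
def maior_linha (mat : List (List Int)) (linha : Int) (coluna : Int) : Int × Int :=
  let r := (PySem.List.pyRange 0 linha 1).foldl
    (fun (st : Int × Int × Int) i =>
      let som := (PySem.List.pyRange 0 coluna 1).foldl
        (fun s j => s + (PySem.List.pyGetD (PySem.List.pyGetD mat i []) j 0) ^ 2) st.2.1
      if st.1 ≤ som then (som, 0, i) else (st.1, 0, st.2.2))
    (0, 0, 0)
  (r.1, r.2.2)

-- ===== PORT B =====
-- the per-row sum of squares, i.e. sum(mat[i][j] ** 2 for j in range(coluna))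
def rowSq (mat : List (List Int)) (coluna : Int) (i : Int) : Int :=
  ((PySem.List.pyRange 0 coluna 1).map
    (fun j => (PySem.List.pyGetD (PySem.List.pyGetD mat i []) j 0) ^ 2)).foldl (· + ·) 0

def maior_linha_alt (mat : List (List Int)) (linha : Int) (coluna : Int) : Int × Int :=
  let sums := (PySem.List.pyRange 0 linha 1).map (rowSq mat coluna)
  if sums = [] then (0, 0)
  else
    let maior := (PySem.List.max? sums (fun y => y)).getD 0
    (maior, (sums.length : Int) - 1 -
      (((PySem.List.index? ((PySem.List.slice? sums none none (-1)).getD []) maior).getD 0 : Nat) : Int))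

-- ===== PRECONDITION & SPEC =====
-- Pre_ excludes exactly the inputs where Python A raises IndexError: when coluna > 0,
-- every accessed row index i < linha must exist in mat and each such row must have
-- at least coluna entries (when coluna ≤ 0 the inner loop never indexes).
def Pre_maior_linha (mat : List (List Int)) (linha : Int) (coluna : Int) : Prop :=
  0 < coluna → (linha ≤ (mat.length : Int) ∧ ∀ r ∈ mat.take linha.toNat, coluna ≤ (r.length : Int))
instance (mat : List (List Int)) (linha : Int) (coluna : Int) : Decidable (Pre_maior_linha mat linha coluna) := by unfold Pre_maior_linha; infer_instance

def pvWitness_maior_linha : List (List Int) × Int × Int := ([[1, 2], [3]], 2, 1)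

def Spec_maior_linha (mat : List (List Int)) (linha : Int) (coluna : Int) (out : Int × Int) : Prop := out = maior_linha_alt mat linha coluna
instance (mat : List (List Int)) (linha : Int) (coluna : Int) (out : Int × Int) : Decidable (Spec_maior_linha mat linha coluna out) := by unfold Spec_maior_linha; infer_instance

-- ===== CLAIM (what is proved, stated in full; the proofs are below) =====
def Claim_equal_maior_linha : Prop := ∀ (mat : List (List Int)) (linha : Int) (coluna : Int), Dom_maior_linha mat linha coluna → Pre_maior_linha mat linha coluna → Spec_maior_linha mat linha coluna (maior_linha mat linha coluna)

-- ===== LEMMAS AND PROOFS =====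

-- A's loop body, abstracted over the list of row sums with a running index.
def aFold : List Int → Int → Int → Int → Int × Int
  | [], _, maior, m => (maior, m)
  | s :: t, i, maior, m => if maior ≤ s then aFold t (i + 1) s i else aFold t (i + 1) maior m

lemma foldA_eq (mat : List (List Int)) (coluna : Int) :
    ∀ (n : Nat) (a b maior m : Int), (b - a).toNat = n →
    (PySem.List.pyRange a b 1).foldl
      (fun (st : Int × Int × Int) i =>
        let som := (PySem.List.pyRange 0 coluna 1).foldl
          (fun s j => s + (PySem.List.pyGetD (PySem.List.pyGetD mat i []) j 0) ^ 2) st.2.1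
        if st.1 ≤ som then (som, 0, i) else (st.1, 0, st.2.2))
      (maior, 0, m)
    = (((aFold ((PySem.List.pyRange a b 1).map (rowSq mat coluna)) a maior m).1, 0,
        (aFold ((PySem.List.pyRange a b 1).map (rowSq mat coluna)) a maior m).2)) := by
  intro n
  induction n with
  | zero =>
    intro a b maior m h
    rw [PySem.List.pyRange_one_eq_nil (a := a) (b := b) (by omega)]
    simp [aFold]
  | succ k ih =>
    intro a b maior m h
    rw [PySem.List.pyRange_one_cons (a := a) (b := b) (by omega)]
    have hrow : (PySem.List.pyRange 0 coluna 1).foldl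
        (fun s j => s + (PySem.List.pyGetD (PySem.List.pyGetD mat a []) j 0) ^ 2) 0
        = rowSq mat coluna a := by
      simp [rowSq, List.foldl_map]
    simp only [List.map_cons, List.foldl_cons]
    by_cases hc : maior ≤ rowSq mat coluna a
    · simp only [hrow, if_pos hc, aFold]
      exact ih (a + 1) b _ _ (by omega)
    · simp only [hrow, if_neg hc, aFold]
      exact ih (a + 1) b _ _ (by omega)

lemma aFold_append (xs : List Int) (s : Int) : ∀ (i maior m : Int),
    aFold (xs ++ [s]) i maior m =
      (if (aFold xs i maior m).1 ≤ s then (s, i + (xs.length : Int)) else aFold xs i maior m) := by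
  induction xs with
  | nil =>
    intro i maior m
    simp [aFold]
  | cons x t ih =>
    intro i maior m
    simp only [List.cons_append, aFold]
    have hlen : i + 1 + (t.length : Int) = i + ((x :: t).length : Int) := by
      simp [List.length_cons]; ring
    by_cases hc : maior ≤ x
    · rw [if_pos hc, if_pos hc, ih, hlen]
    · rw [if_neg hc, if_neg hc, ih, hlen]

lemma max?_append_singleton (xs : List Int) (hx : xs ≠ []) (s : Int) :
    (PySem.List.max? (xs ++ [s]) (fun y => y)).getD 0 =
      max ((PySem.List.max? xs (fun y => y)).getD 0) s := by
  obtain ⟨h, t, rfl⟩ := List.exists_cons_of_ne_nil hx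
  rw [show (h :: t) ++ [s] = h :: (t ++ [s]) from rfl]
  rw [PySem.List.max?_id_cons, PySem.List.max?_id_cons]
  simp [List.foldl_append]

lemma aFold_char : ∀ (xs : List Int), xs ≠ [] → (∀ s ∈ xs, 0 ≤ s) →
    aFold xs 0 0 0 =
      ((PySem.List.max? xs (fun y => y)).getD 0,
       (xs.length : Int) - 1 -
         (((PySem.List.index? xs.reverse ((PySem.List.max? xs (fun y => y)).getD 0)).getD 0 : Nat) : Int)) := by
  intro xs
  induction xs using List.reverseRecOn with
  | nil => intro h; exact absurd rfl h
  | append_singleton t s ih =>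
    intro _ hnn
    by_cases ht : t = []
    · subst ht
      have hs : (0 : Int) ≤ s := hnn s (by simp)
      simp [aFold, hs, PySem.List.max?_id_cons]
    · have hnn' : ∀ x ∈ t, (0 : Int) ≤ x := fun x hx => hnn x (by simp [hx])
      have ihx := ih ht hnn'
      rw [aFold_append, ihx]
      set Mx := (PySem.List.max? t (fun y => y)).getD 0 with hMx
      have hmax := max?_append_singleton t ht s
      rw [List.reverse_append, List.reverse_singleton]
      simp only [List.singleton_append]
      by_cases hc : Mx ≤ s
      · have hms : max Mx s = s := max_eq_right hc
        rw [if_pos hc, hmax, hms, PySem.List.index?_cons_self]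
        simp
      · have hms : max Mx s = Mx := max_eq_left (le_of_lt (lt_of_not_ge hc))
        rw [if_neg hc, hmax, hms]
        have hne : s ≠ Mx := fun he => hc (le_of_eq he.symm)
        rw [PySem.List.index?_cons_of_ne _ hne]
        have hsome : PySem.List.max? t (fun y => y) = some Mx := by
          cases hq : PySem.List.max? t (fun y => y) with
          | none => exact absurd ((PySem.List.max?_eq_none_iff t _).mp hq) ht
          | some v => simp [hMx, hq]
        have hmem : Mx ∈ t.reverse := by
          simpa using PySem.List.max?_mem hsome
        obtain ⟨k, hk⟩ := Option.isSome_iff_exists.mp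
          (((PySem.List.index?_isSome_iff t.reverse Mx)).mpr hmem)
        rw [hk]
        simp
        omega

lemma foldl_add_nonneg : ∀ (l : List Int) (init : Int), 0 ≤ init → (∀ x ∈ l, 0 ≤ x) →
    0 ≤ l.foldl (· + ·) init := by
  intro l
  induction l with
  | nil => intro init h _; simpa using h
  | cons x t ih =>
    intro init h hall
    simp only [List.foldl_cons]
    exact ih (init + x) (by have := hall x (by simp); omega) (fun y hy => hall y (by simp [hy]))

lemma rowSq_nonneg (mat : List (List Int)) (coluna : Int) (i : Int) :
    0 ≤ rowSq mat coluna i := by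
  apply foldl_add_nonneg _ _ le_rfl
  intro x hx
  obtain ⟨j, _, rfl⟩ := List.mem_map.mp hx
  exact sq_nonneg _

-- ===== VERDICT (by name: the statement is the Claim_ definition above) =====
theorem maior_linha_spec : Claim_equal_maior_linha := by
  intro mat linha coluna _ _
  unfold Spec_maior_linha maior_linha maior_linha_alt
  rw [foldA_eq mat coluna (linha - 0).toNat 0 linha 0 0 rfl]
  set S := (PySem.List.pyRange 0 linha 1).map (rowSq mat coluna) with hS
  by_cases hl : linha ≤ 0
  · have hSnil : S = [] := by
      rw [hS, PySem.List.pyRange_one_eq_nil (a := 0) (b := linha) (by omega)]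
      rfl
    simp [hSnil, aFold]
  · have hne : S ≠ [] := by
      rw [hS, PySem.List.pyRange_one_cons (a := 0) (b := linha) (by omega)]
      simp
    have hnn : ∀ s ∈ S, (0 : Int) ≤ s := by
      intro s hs
      obtain ⟨i, _, rfl⟩ := List.mem_map.mp hs
      exact rowSq_nonneg mat coluna i
    rw [if_neg hne]
    simp only [PySem.List.slice?_none_none_neg_one, Option.getD_some]
    exact aFold_char S hne hnn
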